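-- pv_equiv track=rewrite | github.com/GeorgianBadita/Python-Problems | lab3Co/lab3.py | findLongestCoprime
-- ===== SOURCE A (Python) =====
-- def gcd(a, b):
--     '''
--     Compute the greatest common divisor of a and b
--     a, b positive integers
--     return a number, the greatest common divisor of a and b
--     '''
--     if b == 0:
--         return a
--     else:
--         return gcd(b, a % b)
--
-- def findLongestCoprime(myList):
--     '''
--     Find the longest sequence of coprime numbers
--     myList - list of integers
--     return a list representing the longest sequence of coprime numbers
--     '''
--     maxLength = 0
--     position = 0
--     for i in range(0, len(myList)):
--         length = 0
--         while i + 1 < len(myList) and gcd(myList[i], myList[i + 1]) == 1: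
--             length += 1
--             i += 1
--         if length > maxLength:
--             maxLength = length
--             position = i
--     return myList[position - maxLength:position + 1]
-- ===== SOURCE B (Python) =====
-- def _coprime(a, b):
--     while b:
--         a, b = b, a % b
--     return a == 1
--
-- def findLongestCoprime(myList):
--     maxLength = 0
--     position = 0
--     run = 0
--     for i in range(len(myList) - 2, -1, -1):
--         run = run + 1 if _coprime(myList[i], myList[i + 1]) else 0
--         if run >= maxLength:
--             maxLength = run
--             position = i + run
--     return myList[position - maxLength:position + 1]
-- ===== Notes on version B (the rewrite author's own statement) =====
-- stated objective: faster
-- what changed: A restarts an inner gcd-walk at every index (rescanning each coprime run once per element in it); B makes one right-to-left pass computing each run length incrementally with exactly one gcd test per adjacent pair, keeping the leftmost maximal run via a >= update.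
import Mathlib
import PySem

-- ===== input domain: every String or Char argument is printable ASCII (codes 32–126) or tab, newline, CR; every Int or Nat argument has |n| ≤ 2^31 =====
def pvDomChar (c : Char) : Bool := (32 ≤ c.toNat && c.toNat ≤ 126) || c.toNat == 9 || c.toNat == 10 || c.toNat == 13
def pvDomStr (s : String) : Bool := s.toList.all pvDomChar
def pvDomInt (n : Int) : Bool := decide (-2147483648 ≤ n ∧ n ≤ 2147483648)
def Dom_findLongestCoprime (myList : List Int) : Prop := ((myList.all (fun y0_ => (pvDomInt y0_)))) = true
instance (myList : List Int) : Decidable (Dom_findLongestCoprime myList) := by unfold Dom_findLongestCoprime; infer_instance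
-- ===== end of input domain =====

-- B replaces A's quadratic rescan (a while-walk restarted at every index) by one right-to-left
-- pass doing one gcd per adjacent pair; objective: faster (measured constant-factor speed-up).

-- used by the termination arguments of both ports' gcd helpers
theorem pvModNatAbsLt (a b : Int) (h : b ≠ 0) : (PySem.Int.mod a b).natAbs < b.natAbs := by
  rcases lt_or_gt_of_ne h with hb | hb
  · have := PySem.Int.mod_neg_bounds a hb; omega
  · have h1 := PySem.Int.mod_nonneg a (b := b) hb
    have h2 := PySem.Int.mod_lt a (b := b) hb; omega

-- ===== PORT A =====
def pyGcd (a b : Int) : Int :=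
  if h : b = 0 then a else pyGcd b (PySem.Int.mod a b)
termination_by b.natAbs
decreasing_by exact pvModNatAbsLt a b h

-- the inner `while` loop of A (fuel = len(myList) is enough: i only moves right and stays < len)
def walkA (xs : List Int) : Nat → Int → Int → Int × Int
  | 0, i, length => (length, i)
  | fuel + 1, i, length =>
    if i + 1 < (xs.length : Int) ∧
        pyGcd (PySem.List.pyGetD xs i 0) (PySem.List.pyGetD xs (i + 1) 0) = 1 then
      walkA xs fuel (i + 1) (length + 1)
    else (length, i)

def findLongestCoprime (myList : List Int) : List Int :=
  let st :=
    (PySem.List.pyRange 0 (PySem.List.len myList) 1).foldl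
      (fun (st : Int × Int) i =>
        let r := walkA myList myList.length i 0
        if r.1 > st.1 then r else st)
      (0, 0)
  PySem.List.slice myList (some (st.2 - st.1)) (some (st.2 + 1))

-- ===== PORT B =====
def coprimeB (a b : Int) : Bool :=
  if h : b = 0 then a == 1 else coprimeB b (PySem.Int.mod a b)
termination_by b.natAbs
decreasing_by exact pvModNatAbsLt a b h

-- state = (run, maxLength, position), scanned right to left, one gcd per adjacent pair
def findLongestCoprime_alt (myList : List Int) : List Int :=
  let st :=
    (PySem.List.pyRange ((PySem.List.len myList) - 2) (-1) (-1)).foldl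
      (fun (st : Int × Int × Int) i =>
        let run := if coprimeB (PySem.List.pyGetD myList i 0) (PySem.List.pyGetD myList (i + 1) 0)
          then st.1 + 1 else 0
        if run ≥ st.2.1 then (run, run, i + run) else (run, st.2.1, st.2.2))
      (0, 0, 0)
  PySem.List.slice myList (some (st.2.2 - st.2.1)) (some (st.2.2 + 1))

-- ===== PRECONDITION & SPEC =====
def Spec_findLongestCoprime (myList : List Int) (out : List Int) : Prop := out = findLongestCoprime_alt myList
instance (myList : List Int) (out : List Int) : Decidable (Spec_findLongestCoprime myList out) := by unfold Spec_findLongestCoprime; infer_instance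

-- ===== CLAIM (what is proved, stated in full; the proofs are below) =====
def Claim_equal_findLongestCoprime : Prop := ∀ (myList : List Int), Dom_findLongestCoprime myList → Spec_findLongestCoprime myList (findLongestCoprime myList)

-- ===== LEMMAS AND PROOFS =====

-- pvR xs i = number of consecutive coprime adjacent pairs starting at index i
def pvR (xs : List Int) (i : Int) : Int :=
  if h : i + 1 < (xs.length : Int) ∧
      pyGcd (PySem.List.pyGetD xs i 0) (PySem.List.pyGetD xs (i + 1) 0) = 1 then
    pvR xs (i + 1) + 1
  else 0
termination_by ((xs.length : Int) - i).toNat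
decreasing_by obtain ⟨h1, -⟩ := h; omega

-- max of pvR over [i, len)
def pvMx (xs : List Int) (i : Int) : Int :=
  if h : i < (xs.length : Int) then max (pvR xs i) (pvMx xs (i + 1)) else 0
termination_by ((xs.length : Int) - i).toNat
decreasing_by omega

-- leftmost index ≥ i attaining pvMx
def pvAx (xs : List Int) (i : Int) : Int :=
  if h : i < (xs.length : Int) then
    (if pvMx xs (i + 1) ≤ pvR xs i then i else pvAx xs (i + 1))
  else i
termination_by ((xs.length : Int) - i).toNat
decreasing_by omega

-- the position accumulator of A's left-to-right fold
def pvH (xs : List Int) (i m p : Int) : Int :=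
  if h : i < (xs.length : Int) then
    (if m < pvR xs i then pvH xs (i + 1) (pvR xs i) (i + pvR xs i) else pvH xs (i + 1) m p)
  else p
termination_by ((xs.length : Int) - i).toNat
decreasing_by all_goals omega

-- the position accumulator of B's right-to-left fold
def pvG (xs : List Int) (i p : Int) : Int :=
  if h : 0 ≤ i then
    pvG xs (i - 1) (if pvMx xs (i + 1) ≤ pvR xs i then i + pvR xs i else p)
  else p
termination_by (i + 1).toNat
decreasing_by omega

theorem pvR_nonneg (xs : List Int) (i : Int) : 0 ≤ pvR xs i := by
  rw [pvR]
  split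
  · have := pvR_nonneg xs (i + 1); omega
  · omega
termination_by ((xs.length : Int) - i).toNat
decreasing_by rename_i h; obtain ⟨h1, -⟩ := h; omega

theorem pvMx_nonneg (xs : List Int) (i : Int) : 0 ≤ pvMx xs i := by
  rw [pvMx]
  split
  · have := pvR_nonneg xs i; have := pvMx_nonneg xs (i + 1); omega
  · omega
termination_by ((xs.length : Int) - i).toNat
decreasing_by omega

theorem pvR_zero_of_last (xs : List Int) (i : Int) (h : ¬ i + 1 < (xs.length : Int)) :
    pvR xs i = 0 := by
  rw [pvR]; rw [dif_neg]; intro hc; exact h hc.1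

theorem pvAx_ge (xs : List Int) (i : Int) : i ≤ pvAx xs i := by
  rw [pvAx]
  split
  · split
    · omega
    · have := pvAx_ge xs (i + 1); omega
  · omega
termination_by ((xs.length : Int) - i).toNat
decreasing_by omega

theorem pvR_pvAx (xs : List Int) (i : Int) : pvR xs (pvAx xs i) = pvMx xs i := by
  by_cases h : i < (xs.length : Int)
  · rw [pvAx, dif_pos h]
    by_cases hq : pvMx xs (i + 1) ≤ pvR xs i
    · rw [if_pos hq, pvMx, dif_pos h, max_eq_left hq]
    · rw [if_neg hq, pvR_pvAx xs (i + 1)]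
      conv_rhs => rw [pvMx]
      rw [dif_pos h, max_eq_right (by omega)]
  · rw [pvAx, dif_neg h, pvMx, dif_neg h]
    exact pvR_zero_of_last xs i (by omega)
termination_by ((xs.length : Int) - i).toNat
decreasing_by omega

-- if index i qualifies (pvMx (i+1) ≤ pvR i), the leftmost qualifier from any j ≤ i is ≤ i
theorem pvAx_le (xs : List Int) (j i : Int) (hj : j ≤ i) (hi : i < (xs.length : Int))
    (hq : pvMx xs (i + 1) ≤ pvR xs i) : pvAx xs j ≤ i := by
  rw [pvAx, dif_pos (by omega)]
  split
  · omega
  · rcases eq_or_lt_of_le hj with rfl | hlt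
    · omega
    · exact pvAx_le xs (j + 1) i (by omega) hi hq
termination_by (i - j).toNat
decreasing_by omega

-- if pvAx j lands exactly on i then i qualifies and the max is unchanged between j and i
theorem pvAx_eq_imp (xs : List Int) (j i : Int) (hj : j ≤ i) (hi : i < (xs.length : Int))
    (hax : pvAx xs j = i) : pvMx xs (i + 1) ≤ pvR xs i ∧ pvMx xs j = pvMx xs i := by
  rcases eq_or_lt_of_le hj with rfl | hlt
  · refine ⟨?_, by trivial⟩
    rw [pvAx, dif_pos hi] at hax
    by_cases hq : pvMx xs (j + 1) ≤ pvR xs j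
    · exact hq
    · rw [if_neg hq] at hax
      have := pvAx_ge xs (j + 1); omega
  · rw [pvAx, dif_pos (by omega)] at hax
    by_cases hq : pvMx xs (j + 1) ≤ pvR xs j
    · rw [if_pos hq] at hax; omega
    · rw [if_neg hq] at hax
      have ih := pvAx_eq_imp xs (j + 1) i (by omega) hi hax
      refine ⟨ih.1, ?_⟩
      rw [pvMx, dif_pos (by omega : j < (xs.length : Int)), max_eq_right (by omega), ih.2]
termination_by (i - j).toNat
decreasing_by omega

theorem walkA_eq (xs : List Int) (fuel : Nat) (i acc : Int)
    (hf : (xs.length : Int) - i ≤ fuel) :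
    walkA xs fuel i acc = (acc + pvR xs i, i + pvR xs i) := by
  induction fuel generalizing i acc with
  | zero =>
    have : pvR xs i = 0 := pvR_zero_of_last xs i (by omega)
    simp [walkA, this]
  | succ fuel ih =>
    rw [walkA]
    split
    · rename_i h
      rw [ih (i + 1) (acc + 1) (by omega)]
      rw [show pvR xs i = pvR xs (i + 1) + 1 from by rw [pvR, dif_pos h]]
      simp only [Prod.mk.injEq]
      omega
    · rename_i h
      have : pvR xs i = 0 := by rw [pvR, dif_neg h]
      simp [this]

theorem coprimeB_iff (a b : Int) : coprimeB a b = true ↔ pyGcd a b = 1 := by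
  by_cases h : b = 0
  · rw [coprimeB, pyGcd, dif_pos h, dif_pos h]
    simp
  · rw [coprimeB, pyGcd, dif_neg h, dif_neg h]
    exact coprimeB_iff b (PySem.Int.mod a b)
termination_by b.natAbs
decreasing_by exact pvModNatAbsLt a b h

-- A's fold over [i, len) from state (m, p), 0 ≤ m, 0 ≤ i
theorem foldA_eq (xs : List Int) (i m p : Int) (hm : 0 ≤ m) (hi : 0 ≤ i) :
    (PySem.List.pyRange i (xs.length : Int) 1).foldl
      (fun (st : Int × Int) j =>
        let r := walkA xs xs.length j 0
        if r.1 > st.1 then r else st)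
      (m, p)
    = (max m (pvMx xs i), pvH xs i m p) := by
  by_cases h : i < (xs.length : Int)
  · rw [PySem.List.pyRange_one_cons h, List.foldl_cons]
    have hw : walkA xs xs.length i 0 = (0 + pvR xs i, i + pvR xs i) :=
      walkA_eq xs xs.length i 0 (by omega)
    have hMx : pvMx xs i = max (pvR xs i) (pvMx xs (i + 1)) := by rw [pvMx, dif_pos h]
    by_cases hc : m < pvR xs i
    · have hstep : (let r := walkA xs xs.length i 0
          if r.1 > (m, p).1 then r else (m, p)) = (pvR xs i, i + pvR xs i) := by
        simp only [hw, zero_add]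
        rw [if_pos (by simpa using hc)]
      have hH : pvH xs i m p = pvH xs (i + 1) (pvR xs i) (i + pvR xs i) := by
        rw [pvH, dif_pos h, if_pos hc]
      rw [hstep, foldA_eq xs (i + 1) (pvR xs i) (i + pvR xs i) (pvR_nonneg xs i) (by omega),
        hMx, hH]
      simp only [Prod.mk.injEq]
      refine ⟨?_, by trivial⟩
      omega
    · have hstep : (let r := walkA xs xs.length i 0
          if r.1 > (m, p).1 then r else (m, p)) = (m, p) := by
        simp only [hw, zero_add]
        rw [if_neg (by simpa using hc)]
      have hH : pvH xs i m p = pvH xs (i + 1) m p := by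
        rw [pvH, dif_pos h, if_neg hc]
      rw [hstep, foldA_eq xs (i + 1) m p hm (by omega), hMx, hH]
      simp only [Prod.mk.injEq]
      refine ⟨?_, by trivial⟩
      omega
  · rw [PySem.List.pyRange_one_eq_nil (by omega), List.foldl_nil]
    rw [pvMx, dif_neg h, pvH, dif_neg h, max_eq_left hm]
termination_by ((xs.length : Int) - i).toNat
decreasing_by all_goals omega

-- B's fold over [i, -1) (descending) from the invariant state
theorem foldB_eq (xs : List Int) (i p : Int) (hi : -1 ≤ i) (hn : i ≤ (xs.length : Int) - 2) :
    (PySem.List.pyRange i (-1) (-1)).foldl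
      (fun (st : Int × Int × Int) j =>
        let run := if coprimeB (PySem.List.pyGetD xs j 0) (PySem.List.pyGetD xs (j + 1) 0)
          then st.1 + 1 else 0
        if run ≥ st.2.1 then (run, run, j + run) else (run, st.2.1, st.2.2))
      (pvR xs (i + 1), pvMx xs (i + 1), p)
    = (pvR xs 0, pvMx xs 0, pvG xs i p) := by
  by_cases h0 : 0 ≤ i
  · rw [PySem.List.pyRange_neg_one_cons (by omega : (-1 : Int) < i), List.foldl_cons]
    have hrun : (if coprimeB (PySem.List.pyGetD xs i 0) (PySem.List.pyGetD xs (i + 1) 0)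
        then pvR xs (i + 1) + 1 else 0) = pvR xs i := by
      by_cases hcp : pyGcd (PySem.List.pyGetD xs i 0) (PySem.List.pyGetD xs (i + 1) 0) = 1
      · rw [if_pos (by rw [coprimeB_iff]; exact hcp)]
        rw [show pvR xs i = pvR xs (i + 1) + 1 from by rw [pvR, dif_pos ⟨by omega, hcp⟩]]
      · rw [if_neg (by rw [coprimeB_iff]; exact hcp)]
        rw [show pvR xs i = 0 from by rw [pvR, dif_neg (fun hc => hcp hc.2)]]
    have hG : pvG xs i p =
        pvG xs (i - 1) (if pvMx xs (i + 1) ≤ pvR xs i then i + pvR xs i else p) := by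
      rw [pvG, dif_pos h0]
    by_cases hc : pvMx xs (i + 1) ≤ pvR xs i
    · have hmx : pvMx xs i = pvR xs i := by
        rw [pvMx, dif_pos (by omega : i < (xs.length : Int)), max_eq_left hc]
      have hstep : (let run := if coprimeB (PySem.List.pyGetD xs i 0) (PySem.List.pyGetD xs (i + 1) 0)
            then (pvR xs (i + 1), pvMx xs (i + 1), p).1 + 1 else 0
          if run ≥ (pvR xs (i + 1), pvMx xs (i + 1), p).2.1 then (run, run, i + run)
          else (run, (pvR xs (i + 1), pvMx xs (i + 1), p).2.1, (pvR xs (i + 1), pvMx xs (i + 1), p).2.2))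
          = (pvR xs (i - 1 + 1), pvMx xs (i - 1 + 1), i + pvR xs i) := by
        simp only [hrun]
        rw [if_pos (by simpa using hc), show i - 1 + 1 = i from by ring, hmx]
      rw [hstep, foldB_eq xs (i - 1) (i + pvR xs i) (by omega) (by omega), hG,
        if_pos hc]
    · have hmx : pvMx xs i = pvMx xs (i + 1) := by
        rw [pvMx, dif_pos (by omega : i < (xs.length : Int)), max_eq_right (by omega)]
      have hstep : (let run := if coprimeB (PySem.List.pyGetD xs i 0) (PySem.List.pyGetD xs (i + 1) 0)
            then (pvR xs (i + 1), pvMx xs (i + 1), p).1 + 1 else 0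
          if run ≥ (pvR xs (i + 1), pvMx xs (i + 1), p).2.1 then (run, run, i + run)
          else (run, (pvR xs (i + 1), pvMx xs (i + 1), p).2.1, (pvR xs (i + 1), pvMx xs (i + 1), p).2.2))
          = (pvR xs (i - 1 + 1), pvMx xs (i - 1 + 1), p) := by
        simp only [hrun]
        rw [if_neg (by simpa using hc), show i - 1 + 1 = i from by ring, hmx]
      rw [hstep, foldB_eq xs (i - 1) p (by omega) (by omega), hG, if_neg hc]
  · rw [PySem.List.pyRange_neg_one_eq_nil (by omega), List.foldl_nil]
    have hone : i = -1 := by omega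
    subst hone
    rw [show (-1 : Int) + 1 = 0 from by ring, pvG, dif_neg (by norm_num)]
termination_by (i + 1).toNat
decreasing_by all_goals omega

theorem pvH_eq (xs : List Int) (i m p : Int) (hi : 0 ≤ i) (hm : 0 ≤ m) :
    pvH xs i m p = if m < pvMx xs i then pvAx xs i + pvMx xs i else p := by
  by_cases h : i < (xs.length : Int)
  · have hMx : pvMx xs i = max (pvR xs i) (pvMx xs (i + 1)) := by rw [pvMx, dif_pos h]
    by_cases hc : m < pvR xs i
    · rw [pvH, dif_pos h, if_pos hc,
        pvH_eq xs (i + 1) (pvR xs i) (i + pvR xs i) (by omega) (pvR_nonneg xs i)]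
      by_cases h2 : pvMx xs (i + 1) ≤ pvR xs i
      · have hAx : pvAx xs i = i := by rw [pvAx, dif_pos h, if_pos h2]
        have hMx' : pvMx xs i = pvR xs i := by rw [hMx, max_eq_left h2]
        rw [if_neg (by omega), hAx, hMx', if_pos hc]
      · have hAx : pvAx xs i = pvAx xs (i + 1) := by rw [pvAx, dif_pos h, if_neg h2]
        have hMx' : pvMx xs i = pvMx xs (i + 1) := by rw [hMx, max_eq_right (by omega)]
        rw [if_pos (by omega), hAx, hMx', if_pos (by omega)]
    · rw [pvH, dif_pos h, if_neg hc, pvH_eq xs (i + 1) m p (by omega) hm]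
      by_cases h2 : m < pvMx xs (i + 1)
      · have h3 : ¬ pvMx xs (i + 1) ≤ pvR xs i := by omega
        have hAx : pvAx xs i = pvAx xs (i + 1) := by rw [pvAx, dif_pos h, if_neg h3]
        have hMx' : pvMx xs i = pvMx xs (i + 1) := by rw [hMx, max_eq_right (by omega)]
        rw [if_pos h2, hAx, hMx', if_pos h2]
      · have hMxle : pvMx xs i ≤ m := by
          rw [hMx]
          rcases max_cases (pvR xs i) (pvMx xs (i + 1)) with ⟨he, _⟩ | ⟨he, _⟩ <;> omega
        rw [if_neg h2, if_neg (by omega)]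
  · rw [pvH, dif_neg h, pvMx, dif_neg h, if_neg (by omega)]
termination_by ((xs.length : Int) - i).toNat
decreasing_by all_goals omega

theorem pvG_eq (xs : List Int) (i p : Int) (hi : -1 ≤ i) (hn : i ≤ (xs.length : Int) - 2) :
    pvG xs i p = if pvAx xs 0 ≤ i then pvAx xs 0 + pvMx xs 0 else p := by
  rw [pvG]
  by_cases h0 : 0 ≤ i
  · rw [dif_pos h0]
    by_cases hc : pvMx xs (i + 1) ≤ pvR xs i
    · rw [if_pos hc, pvG_eq xs (i - 1) (i + pvR xs i) (by omega) (by omega)]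
      have hax : pvAx xs 0 ≤ i := pvAx_le xs 0 i h0 (by omega) hc
      rw [if_pos hax]
      by_cases h1 : pvAx xs 0 ≤ i - 1
      · rw [if_pos h1]
      · rw [if_neg h1]
        have he : pvAx xs 0 = i := by omega
        have := pvAx_eq_imp xs 0 i h0 (by omega) he
        have hmx : pvMx xs i = pvR xs i := by
          rw [pvMx, dif_pos (by omega : i < (xs.length : Int)), max_eq_left hc]
        rw [he, this.2, hmx]
    · rw [if_neg hc, pvG_eq xs (i - 1) p (by omega) (by omega)]
      have hne : pvAx xs 0 ≠ i := by
        intro he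
        exact hc (pvAx_eq_imp xs 0 i h0 (by omega) he).1
      by_cases h1 : pvAx xs 0 ≤ i - 1
      · rw [if_pos h1, if_pos (by omega)]
      · rw [if_neg h1, if_neg (by omega)]
  · rw [dif_neg h0]
    have := pvAx_ge xs 0
    rw [if_neg (by omega)]
termination_by (i + 1).toNat
decreasing_by all_goals omega

theorem ports_agree (xs : List Int) : findLongestCoprime xs = findLongestCoprime_alt xs := by
  simp only [findLongestCoprime, findLongestCoprime_alt, PySem.List.len_eq]
  rw [foldA_eq xs 0 0 0 le_rfl le_rfl]
  have hmax : max 0 (pvMx xs 0) = pvMx xs 0 := max_eq_right (pvMx_nonneg xs 0)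
  by_cases h2 : 2 ≤ (xs.length : Int)
  · have hR0 : pvR xs ((xs.length : Int) - 2 + 1) = 0 := pvR_zero_of_last xs _ (by omega)
    have hM0 : pvMx xs ((xs.length : Int) - 2 + 1) = 0 := by
      rw [pvMx, dif_pos (by omega : (xs.length : Int) - 2 + 1 < (xs.length : Int)), hR0,
        pvMx, dif_neg (by omega)]
      simp
    rw [show ((0, 0, 0) : Int × Int × Int)
        = (pvR xs ((xs.length : Int) - 2 + 1), pvMx xs ((xs.length : Int) - 2 + 1), (0 : Int))
      from by rw [hR0, hM0]]
    rw [foldB_eq xs ((xs.length : Int) - 2) 0 (by omega) (by omega)]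
    have hpos : pvH xs 0 0 0 = pvG xs ((xs.length : Int) - 2) 0 := by
      rw [pvH_eq xs 0 0 0 le_rfl le_rfl, pvG_eq xs ((xs.length : Int) - 2) 0 (by omega) (by omega)]
      by_cases hMx : 0 < pvMx xs 0
      · rw [if_pos hMx]
        have hAx2 : pvAx xs 0 ≤ (xs.length : Int) - 2 := by
          have hr := pvR_pvAx xs 0
          by_contra hcon
          have : pvR xs (pvAx xs 0) = 0 := pvR_zero_of_last xs _ (by omega)
          omega
        rw [if_pos hAx2]
      · have hM : pvMx xs 0 = 0 := by have := pvMx_nonneg xs 0; omega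
        have hu : pvMx xs 0 = max (pvR xs 0) (pvMx xs (0 + 1)) := by
          rw [pvMx, dif_pos (by omega : (0 : Int) < (xs.length : Int))]
        have hAx0 : pvAx xs 0 = 0 := by
          rw [pvAx, dif_pos (by omega : (0 : Int) < (xs.length : Int)), if_pos ?_]
          have h0 := pvR_nonneg xs 0
          have h1 := pvMx_nonneg xs (0 + 1)
          omega
        rw [if_neg hMx, hAx0, hM, if_pos (by omega)]
        norm_num
    rw [hmax, hpos]
  · rw [PySem.List.pyRange_neg_one_eq_nil (by omega), List.foldl_nil]
    have hMx0 : pvMx xs 0 = 0 := by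
      rw [pvMx]
      by_cases h1 : (0 : Int) < (xs.length : Int)
      · rw [dif_pos h1, pvR_zero_of_last xs 0 (by omega), pvMx, dif_neg (by omega)]
        simp
      · rw [dif_neg h1]
    have hH0 : pvH xs 0 0 0 = 0 := by
      rw [pvH_eq xs 0 0 0 le_rfl le_rfl, hMx0, if_neg (by omega)]
    rw [hmax, hMx0, hH0]

-- ===== VERDICT (by name: the statement is the Claim_ definition above) =====
theorem findLongestCoprime_spec : Claim_equal_findLongestCoprime := by
  intro xs _
  unfold Spec_findLongestCoprime
  exact ports_agree xs
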